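-- pv_equiv track=rewrite | github.com/eatenbywo1ves/studious-chainsaw | projects/active/shared/gateway/api_gateway.py | _sanitize_path_for_logging
-- ===== SOURCE A (Python) =====
-- def _sanitize_path_for_logging(path: str) -> str:
--     """Sanitize request paths for logging"""
--     # Remove sensitive parameters from query strings
--     if "?" in path:
--         base_path, query = path.split("?", 1)
--         # Remove sensitive query parameters
--         sensitive_params = ["password", "token", "key", "secret", "auth"]
--         query_parts = []
--         for param in query.split("&"):
--             if "=" in param:
--                 param_name = param.split("=")[0].lower()
--                 if any(sensitive in param_name for sensitive in sensitive_params):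
--                     query_parts.append(f"{param.split('=')[0]}=[REDACTED]")
--                 else:
--                     query_parts.append(param)
--             else:
--                 query_parts.append(param)
--         return f"{base_path}?{'&'.join(query_parts)}"
--     return path
-- ===== SOURCE B (Python) =====
-- import re
--
-- def _sanitize_path_for_logging(path: str) -> str:
--     """Sanitize request paths for logging"""
--     if "?" in path:
--         base_path, query = path.split("?", 1)
--         sensitive_params = ["password", "token", "key", "secret", "auth"]
--
--         def repl(m):
--             key = m.group(1)
--             if any(s in key.lower() for s in sensitive_params):
--                 return f"{key}=[REDACTED]"
--             return m.group(0)
--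
--         new_query = re.sub(r"(?:^|(?<=&))([^&=]+)=([^&]*)", repl, query)
--         return f"{base_path}?{new_query}"
--     return path
-- ===== Notes on version B (the rewrite author's own statement) =====
-- stated objective: idiomatic
-- what changed: Replaces the manual split('&') loop with per-parameter branching and '&'.join by a single anchored re.sub over the whole query whose replacement function redacts sensitive keys in place.
import Mathlib
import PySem

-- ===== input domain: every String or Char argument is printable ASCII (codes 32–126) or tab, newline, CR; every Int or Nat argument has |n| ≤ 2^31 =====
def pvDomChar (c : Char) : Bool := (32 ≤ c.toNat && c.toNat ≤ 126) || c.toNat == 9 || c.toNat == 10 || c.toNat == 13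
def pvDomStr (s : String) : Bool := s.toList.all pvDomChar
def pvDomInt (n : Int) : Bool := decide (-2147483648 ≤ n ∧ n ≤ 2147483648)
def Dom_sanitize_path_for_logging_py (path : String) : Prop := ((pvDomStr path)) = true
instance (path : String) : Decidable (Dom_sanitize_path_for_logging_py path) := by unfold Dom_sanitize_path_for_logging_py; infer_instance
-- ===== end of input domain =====

-- B replaces A's manual split('&') loop + '&'.join by one anchored regex substitution over
-- the whole query (more idiomatic, same cost); the return values are proved equal on all inputs.

-- ===== PORT A =====
-- sensitive_params = ["password", "token", "key", "secret", "auth"]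
def pvSensitiveA : List (List Char) :=
  ["password".toList, "token".toList, "key".toList, "secret".toList, "auth".toList]

-- loop body of A: one `param` from query.split("&") to the element appended to query_parts
def pvParamA (param : List Char) : List Char :=
  if PySem.Chars.isIn ['='] param then
    let param_name := PySem.Chars.lower ((PySem.Chars.splitOn param ['=']).headD [])
    if pvSensitiveA.any (fun s => PySem.Chars.isIn s param_name) then
      (PySem.Chars.splitOn param ['=']).headD [] ++ "=[REDACTED]".toList
    else param
  else param

def sanitize_path_for_logging_py (path : String) : String :=
  if PySem.Chars.isIn ['?'] path.toList then
    -- base_path, query = path.split("?", 1): '?' is present, so the result has exactly 2 parts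
    let parts := PySem.Chars.splitOnMax path.toList ['?'] 1
    let base_path := parts.getD 0 []
    let query := parts.getD 1 []
    let query_parts := (PySem.Chars.splitOn query ['&']).foldl
      (fun acc param => acc ++ [pvParamA param]) []
    String.ofList (base_path ++ ['?'] ++ PySem.Chars.join ['&'] query_parts)
  else path

-- ===== PORT B =====
-- repl(m): key = m.group(1), value = m.group(2); m.group(0) = key ++ "=" ++ value
def pvRepl (key value : List Char) : List Char :=
  if pvSensitiveA.any (fun s => PySem.Chars.isIn s (PySem.Chars.lower key)) then
    key ++ "=[REDACTED]".toList
  else key ++ '=' :: value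

-- re.sub(r"(?:^|(?<=&))([^&=]+)=([^&]*)", repl, s), hand-ported for exactly this fixed
-- pattern (PySem has no regex engine): the lookbehind anchors matches at the string start or
-- right after '&'; at an anchored position the engine takes a maximal nonempty run of
-- non-'&'/'=' chars as group 1, requires '=', takes a maximal run of non-'&' chars as
-- group 2, emits repl(m) and resumes after the match; if no match starts at the anchor,
-- characters are copied verbatim up to the next anchor (no other position can start a
-- match). Exact for this fixed pattern on all inputs. The fuel argument only makes the
-- recursion structural; pvSub supplies more fuel than the scan can consume.
def pvSub.go : Nat → List Char → List Char
  | 0, s => s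
  | _, [] => []
  | fuel + 1, s =>
    let key := s.takeWhile (fun c => c != '&' && c != '=')
    match key, s.drop key.length with
    | _ :: _, '=' :: r =>
      let value := r.takeWhile (fun c => c != '&')
      pvRepl key value ++
        (match r.drop value.length with
         | '&' :: t => '&' :: pvSub.go fuel t
         | _ => [])
    | _, _ =>
      let skip := s.takeWhile (fun c => c != '&')
      match s.drop skip.length with
      | '&' :: t => skip ++ '&' :: pvSub.go fuel t
      | _ => s

def pvSub (s : List Char) : List Char := pvSub.go (s.length + 1) s

def sanitize_path_for_logging_py_alt (path : String) : String :=
  if PySem.Chars.isIn ['?'] path.toList then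
    let parts := PySem.Chars.splitOnMax path.toList ['?'] 1
    let base_path := parts.getD 0 []
    let query := parts.getD 1 []
    String.ofList (base_path ++ ['?'] ++ pvSub query)
  else path

-- ===== PRECONDITION & SPEC =====
def Spec_sanitize_path_for_logging_py (path : String) (out : String) : Prop := out = sanitize_path_for_logging_py_alt path
instance (path : String) (out : String) : Decidable (Spec_sanitize_path_for_logging_py path out) := by unfold Spec_sanitize_path_for_logging_py; infer_instance

-- ===== CLAIM (what is proved, stated in full; the proofs are below) =====
def Claim_equal_sanitize_path_for_logging_py : Prop := ∀ (path : String), Dom_sanitize_path_for_logging_py path → Spec_sanitize_path_for_logging_py path (sanitize_path_for_logging_py path)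

-- ===== LEMMAS AND PROOFS =====

-- structural form of Python's s.split(ch) for a single-character separator
def pvSplitC (ch : Char) : List Char → List Char → List (List Char)
  | pre, [] => [pre]
  | pre, c :: t => if c = ch then pre :: pvSplitC ch [] t else pvSplitC ch (pre ++ [c]) t

theorem pvSplitC_ne_nil (ch : Char) (pre q : List Char) : pvSplitC ch pre q ≠ [] := by
  induction q generalizing pre with
  | nil => simp [pvSplitC]
  | cons c t ih => simp only [pvSplitC]; split <;> simp [ih]

theorem pvSplitOn_go_eq (ch : Char) (l : List Char) (fuel : Nat) (cur : List Char)
    (acc : List (List Char)) (hf : l.length < fuel) :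
    PySem.Chars.splitOn.go [ch] fuel l cur acc = acc.reverse ++ pvSplitC ch cur.reverse l := by
  induction l generalizing fuel cur acc with
  | nil =>
    obtain ⟨f, rfl⟩ : ∃ f, fuel = f + 1 := ⟨fuel - 1, by omega⟩
    simp [PySem.Chars.splitOn.go, pvSplitC]
  | cons c rest ih =>
    obtain ⟨f, rfl⟩ : ∃ f, fuel = f + 1 := ⟨fuel - 1, by omega⟩
    rw [PySem.Chars.splitOn.go]
    by_cases hc : c = ch
    · subst hc
      have hpre : [c].isPrefixOf (c :: rest) = true := by simp [List.isPrefixOf]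
      simp only [hpre, if_true, List.length_cons, List.length_nil, List.drop_succ_cons,
        List.drop]
      rw [ih f [] (cur.reverse :: acc) (by simp at hf; omega)]
      simp [pvSplitC]
    · have hpre : [ch].isPrefixOf (c :: rest) = false := by
        simp [List.isPrefixOf]
        exact fun h => absurd h.symm hc
      simp only [hpre, if_false, Bool.false_eq_true]
      rw [ih f (c :: cur) acc (by simp at hf; omega)]
      simp [pvSplitC, hc]

theorem pvSplitOn_eq (ch : Char) (q : List Char) :
    PySem.Chars.splitOn q [ch] = pvSplitC ch [] q := by
  have := pvSplitOn_go_eq ch q (q.length + 1) [] [] (by omega)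
  simpa [PySem.Chars.splitOn] using this

theorem pvSplitC_no_sep (ch : Char) (pre q : List Char) (h : ∀ c ∈ q, c ≠ ch) :
    pvSplitC ch pre q = [pre ++ q] := by
  induction q generalizing pre with
  | nil => simp [pvSplitC]
  | cons c t ih =>
    have hc : c ≠ ch := h c (by simp)
    simp only [pvSplitC, if_neg hc]
    rw [ih _ (fun x hx => h x (by simp [hx]))]
    simp

theorem pvSplitC_sep (ch : Char) (pre p t : List Char) (h : ∀ c ∈ p, c ≠ ch) :
    pvSplitC ch pre (p ++ ch :: t) = (pre ++ p) :: pvSplitC ch [] t := by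
  induction p generalizing pre with
  | nil => simp [pvSplitC]
  | cons c p' ih =>
    have hc : c ≠ ch := h c (by simp)
    simp only [List.cons_append, pvSplitC, if_neg hc]
    rw [ih _ (fun x hx => h x (by simp [hx]))]
    simp

theorem pvJoin_cons_cons (ch : Char) (a b : List Char) (l : List (List Char)) :
    PySem.Chars.join [ch] (a :: b :: l) = a ++ ch :: PySem.Chars.join [ch] (b :: l) := by
  simp [PySem.Chars.join, List.intercalate, List.intersperse]

theorem pvIsIn_singleton (c : Char) (p : List Char) :
    PySem.Chars.isIn [c] p = true ↔ c ∈ p := by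
  rw [PySem.Chars.isIn_iff_infix]
  constructor
  · exact fun h => List.singleton_sublist.mp h.sublist
  · intro h
    obtain ⟨s, t, rfl⟩ := List.append_of_mem h
    exact ⟨s, t, by simp⟩

theorem pvKey_eq (p : List Char) (h : ∀ c ∈ p, c ≠ '&') :
    p.takeWhile (fun c => c != '&' && c != '=') = p.takeWhile (fun c => c != '=') := by
  induction p with
  | nil => rfl
  | cons c t ih =>
    have hc : (c != '&') = true := by simpa using h c (by simp)
    by_cases he : c = '='
    · subst he; simp [hc]
    · simp only [List.takeWhile_cons, hc, Bool.true_and]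
      have h2 : (c != '=') = true := by simpa using he
      rw [h2]
      simp [ih (fun x hx => h x (by simp [hx]))]

-- key of (p ++ '&' :: t) for '&'-free p is p.takeWhile (· != '=')
theorem pvKey_append (p t : List Char) (h : ∀ c ∈ p, c ≠ '&') :
    (p ++ '&' :: t).takeWhile (fun c => c != '&' && c != '=') = p.takeWhile (fun c => c != '=') := by
  induction p with
  | nil => simp [List.takeWhile_cons]
  | cons c p' ih =>
    have hc : (c != '&') = true := by simpa using h c (by simp)
    by_cases he : c = '='
    · subst he; simp [hc]
    · simp only [List.cons_append, List.takeWhile_cons, hc, Bool.true_and]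
      have h2 : (c != '=') = true := by simpa using he
      rw [h2]
      simp [ih (fun x hx => h x (by simp [hx]))]

theorem pvTakeWhile_appendC (ch : Char) (p t : List Char) (pred : Char → Bool)
    (h : ∀ c ∈ p, pred c = true) (hch : pred ch = false) :
    (p ++ ch :: t).takeWhile pred = p := by
  induction p with
  | nil => simp [hch]
  | cons c p' ih =>
    simp only [List.cons_append, List.takeWhile_cons, h c (by simp)]
    simp [ih (fun x hx => h x (by simp [hx]))]

theorem pvDropWhile_head (pred : Char → Bool) (l : List Char) (c : Char) (t : List Char)
    (h : l.dropWhile pred = c :: t) : pred c = false := by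
  induction l with
  | nil => simp at h
  | cons x xs ih =>
    by_cases hx : pred x
    · exact ih (by simpa [List.dropWhile_cons, hx] using h)
    · rw [List.dropWhile_cons, if_neg (by simpa using hx)] at h
      cases h; simpa using hx

theorem pvParamA_with_eq (k v : List Char) (hk : ∀ c ∈ k, c ≠ '=') :
    pvParamA (k ++ '=' :: v) =
      (if pvSensitiveA.any (fun s => PySem.Chars.isIn s (PySem.Chars.lower k)) then
        k ++ "=[REDACTED]".toList else k ++ '=' :: v) := by
  have hin : PySem.Chars.isIn ['='] (k ++ '=' :: v) = true :=
    (pvIsIn_singleton _ _).mpr (by simp)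
  rw [pvParamA]
  simp only [hin, if_true, pvSplitOn_eq, pvSplitC_sep '=' [] k v hk, List.nil_append,
    List.headD_cons]

theorem pvParamA_no_eq (p : List Char) (h : '=' ∉ p) : pvParamA p = p := by
  have hin : PySem.Chars.isIn ['='] p = false := by
    rw [← Bool.not_eq_true, pvIsIn_singleton]; exact h
  rw [pvParamA]
  simp [hin]


theorem pvSplitEq (p : List Char) (hmem : '=' ∈ p) :
    ∃ k v, p = k ++ '=' :: v ∧ ∀ c ∈ k, c ≠ '=' := by
  cases hd : p.dropWhile (fun c => c != '=') with
  | nil =>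
    exfalso
    have hall := List.dropWhile_eq_nil_iff.mp hd
    have := hall '=' hmem
    simp at this
  | cons c v =>
    have hc : c = '=' := by
      have := pvDropWhile_head _ p c v hd
      simpa using this
    subst hc
    refine ⟨p.takeWhile (fun c => c != '='), v, ?_, ?_⟩
    · conv_lhs => rw [← List.takeWhile_append_dropWhile (p := fun c => c != '=') (l := p)]
      rw [hd]
    · intro c hc
      have := List.mem_takeWhile_imp hc
      simpa using this


theorem pvTakeWhile_self (p : List Char) (pred : Char → Bool) (h : ∀ c ∈ p, pred c = true) :
    p.takeWhile pred = p := by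
  induction p with
  | nil => rfl
  | cons c p' ih =>
    simp only [List.takeWhile_cons, h c (by simp)]
    simp [ih (fun x hx => h x (by simp [hx]))]

theorem pvSensFalseNil : pvSensitiveA.any (fun s => PySem.Chars.isIn s (PySem.Chars.lower [])) = false := by
  decide

theorem pvGo_amp (f : Nat) (p t : List Char) (h : ∀ c ∈ p, c ≠ '&') :
    pvSub.go (f + 1) (p ++ '&' :: t) = pvParamA p ++ '&' :: pvSub.go f t := by
  have hskip : (p ++ '&' :: t).takeWhile (fun c => c != '&') = p :=
    pvTakeWhile_appendC '&' p t _ (fun c hc => by simpa using h c hc) (by simp)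
  rw [pvSub.go]
  case x_2 => simp
  simp only [pvKey_append p t h]
  by_cases hmem : '=' ∈ p
  · obtain ⟨k, v, rfl, hkf⟩ := pvSplitEq p hmem
    have hkey : (k ++ '=' :: v).takeWhile (fun c => c != '=') = k :=
      pvTakeWhile_appendC '=' k v _ (fun c hc => by simpa using hkf c hc) (by simp)
    have hvf : ∀ c ∈ v, c ≠ '&' := fun c hc => h c (by simp [hc])
    have hvfb : ∀ c ∈ v, (c != '&') = true := fun c hc => by simpa using hvf c hc
    rw [hkey]
    have hassoc : (k ++ '=' :: v) ++ '&' :: t = k ++ '=' :: (v ++ '&' :: t) := by simp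
    rw [hassoc, List.drop_left]
    rcases k with _ | ⟨c0, k'⟩
    · have h2 : ('=' :: (v ++ '&' :: t)) = ('=' :: v) ++ '&' :: t := by simp
      have hsk : (('=' :: v) ++ '&' :: t).takeWhile (fun c => c != '&') = '=' :: v :=
        pvTakeWhile_appendC '&' ('=' :: v) t _
          (fun c hc => by simpa using h c (by simpa using hc)) (by simp)
      simp only [List.nil_append, h2, hsk, List.drop_left]
      rw [show ('=' :: v) = [] ++ '=' :: v from rfl, pvParamA_with_eq [] v (by simp)]
      simp [pvSensFalseNil]
    · have hval : (v ++ '&' :: t).takeWhile (fun c => c != '&') = v :=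
        pvTakeWhile_appendC '&' v t _ hvfb (by simp)
      simp only [hval, List.drop_left]
      rw [pvParamA_with_eq (c0 :: k') v hkf, pvRepl]
  · have hmb : ∀ c ∈ p, (c != '=') = true := fun c hc => by
      simp only [bne_iff_ne, ne_eq]
      intro he
      exact hmem (he ▸ hc)
    rw [pvTakeWhile_self p _ hmb, List.drop_left]
    split
    · rename_i heq1 heq2
      simp at heq2
    · rw [hskip, List.drop_left]
      rw [pvParamA_no_eq _ hmem]
      rfl

theorem pvGo_last (f : Nat) (p : List Char) (h : ∀ c ∈ p, c ≠ '&') :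
    pvSub.go (f + 1) p = pvParamA p := by
  have hbf : ∀ c ∈ p, (c != '&') = true := fun c hc => by simpa using h c hc
  rcases p with _ | ⟨c1, p1⟩
  · rw [pvSub.go, pvParamA_no_eq [] (by simp)]
    omega
  · rw [pvSub.go]
    case x_2 => simp
    rw [pvKey_eq _ h]
    by_cases hmem : '=' ∈ (c1 :: p1)
    · obtain ⟨k, v, hp, hkf⟩ := pvSplitEq _ hmem
      rw [hp]
      have hkey : (k ++ '=' :: v).takeWhile (fun c => c != '=') = k :=
        pvTakeWhile_appendC '=' k v _ (fun c hc => by simpa using hkf c hc) (by simp)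
      rw [hkey, List.drop_left]
      have hvfb : ∀ c ∈ v, (c != '&') = true := fun c hc => hbf c (by rw [hp]; simp [hc])
      rcases k with _ | ⟨c0, k'⟩
      · have hsk : ('=' :: v).takeWhile (fun c => c != '&') = '=' :: v :=
          pvTakeWhile_self _ _ (fun c hc => hbf c (by rw [hp]; simpa using hc))
        simp only [List.nil_append, hsk, List.drop_length]
        rw [show ('=' :: v) = [] ++ '=' :: v from rfl, pvParamA_with_eq [] v (by simp)]
        simp [pvSensFalseNil]
      · have hval : v.takeWhile (fun c => c != '&') = v := pvTakeWhile_self _ _ hvfb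
        simp only [hval, List.drop_length]
        rw [pvParamA_with_eq (c0 :: k') v hkf, pvRepl]
        simp
    · have hmb : ∀ c ∈ (c1 :: p1), (c != '=') = true := fun c hc => by
        simp only [bne_iff_ne, ne_eq]
        intro he
        exact hmem (he ▸ hc)
      rw [pvTakeWhile_self _ _ hmb, List.drop_length]
      split
      · rename_i heq1 heq2
        simp at heq2
      · simp [pvTakeWhile_self _ _ hbf, List.drop_length, pvParamA_no_eq _ hmem]

theorem pvGo_join (f : Nat) : ∀ q : List Char, q.length < f →
    pvSub.go f q = PySem.Chars.join ['&'] ((pvSplitC '&' [] q).map pvParamA) := by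
  induction f with
  | zero => intro q h; omega
  | succ f ih =>
    intro q hq
    cases hd : q.dropWhile (fun c => c != '&') with
    | nil =>
      have hall := List.dropWhile_eq_nil_iff.mp hd
      have hne : ∀ c ∈ q, c ≠ '&' := fun c hc => by simpa using hall c hc
      rw [pvGo_last f q hne, pvSplitC_no_sep '&' [] q hne]
      simp [PySem.Chars.join, List.intercalate]
    | cons c t =>
      have hc : c = '&' := by simpa using pvDropWhile_head _ q c t hd
      subst hc
      have hq' : q = q.takeWhile (fun c => c != '&') ++ '&' :: t := by
        conv_lhs => rw [← List.takeWhile_append_dropWhile (p := fun c => c != '&') (l := q)]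
        rw [hd]
      have hpf : ∀ c ∈ q.takeWhile (fun c => c != '&'), c ≠ '&' := fun c hc => by
        simpa using List.mem_takeWhile_imp hc
      have hlen : t.length < f := by
        have := congrArg List.length hq'
        simp at this
        omega
      rw [hq', pvGo_amp f _ t hpf, pvSplitC_sep '&' [] _ t hpf]
      rw [ih t hlen]
      simp only [List.map_cons, List.nil_append]
      obtain ⟨x, l', hx⟩ : ∃ x l', (pvSplitC '&' [] t).map pvParamA = x :: l' := by
        cases hxx : (pvSplitC '&' [] t).map pvParamA with
        | nil =>
          exact absurd (List.map_eq_nil_iff.mp hxx) (pvSplitC_ne_nil '&' [] t)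
        | cons x l' => exact ⟨x, l', rfl⟩
      rw [hx, pvJoin_cons_cons]

theorem pvSub_eq_join (q : List Char) :
    pvSub q = PySem.Chars.join ['&'] ((PySem.Chars.splitOn q ['&']).map pvParamA) := by
  rw [pvSub, pvGo_join (q.length + 1) q (by omega), pvSplitOn_eq]

-- ===== VERDICT (by name: the statement is the Claim_ definition above) =====
theorem sanitize_path_for_logging_py_spec : Claim_equal_sanitize_path_for_logging_py := by
  intro path _
  unfold Spec_sanitize_path_for_logging_py
  unfold sanitize_path_for_logging_py sanitize_path_for_logging_py_alt
  by_cases hq : PySem.Chars.isIn ['?'] path.toList = true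
  · simp only [hq, if_true]
    simp only [PySem.List.foldl_append_singleton_eq_map, List.nil_append, pvSub_eq_join]
  · simp [hq]
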